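-- pv_equiv track=rewrite | github.com/uvsq22102829/l1-python | exercises/TD04_listes/syracuse.py | max_altitude
-- ===== SOURCE A (Python) =====
-- def syracuse(n):
--     """ Retourne la liste des valeurs de la suite en partant de n jusqu'à 1 """
--     liste = [n]
--     while n != 1:
--         if n % 2 == 0:
--             n //= 2
--             liste.append(n)
--         else:
--             n = n * 3 + 1
--             liste.append(n)
--     return liste
--
-- def max_altitude(n):
--     liste = []
--     for i in range(1, n + 1):
--         liste_syracuse = syracuse(i)
--         max_val = max(liste_syracuse)
--         liste.append(max_val)
--
--     val_max = max(liste)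
--     return val_max
-- ===== SOURCE B (Python) =====
-- def max_altitude(n):
--     # Dynamic programming over the start values: peaks[i] is the maximum of the
--     # Syracuse sequence starting at i.  The chain from i is walked only while it
--     # stays >= i; as soon as it drops to some x < i the already-computed peaks[x]
--     # supplies the rest, so overlapping chain tails are never re-walked.
--     peaks = [0, 1]
--     for i in range(2, n + 1):
--         x = i
--         p = i
--         while x >= i:
--             x = x // 2 if x % 2 == 0 else x * 3 + 1
--             if x > p:
--                 p = x
--         peaks.append(max(p, peaks[x]))
--     return max(peaks[1:n + 1])
-- ===== Notes on version B (the rewrite author's own statement) =====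
-- stated objective: faster
-- what changed: Replaces A's independent full re-walk of every Syracuse chain (materialized as a list, max'ed, collected, max'ed again) with dynamic programming over the start values: peaks[i] is filled for i = 1..n, each chain is walked only while it stays >= i, and the memoized peaks[x] of the first value x < i supplies the rest, so overlapping chain tails are never re-walked.
import Mathlib
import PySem

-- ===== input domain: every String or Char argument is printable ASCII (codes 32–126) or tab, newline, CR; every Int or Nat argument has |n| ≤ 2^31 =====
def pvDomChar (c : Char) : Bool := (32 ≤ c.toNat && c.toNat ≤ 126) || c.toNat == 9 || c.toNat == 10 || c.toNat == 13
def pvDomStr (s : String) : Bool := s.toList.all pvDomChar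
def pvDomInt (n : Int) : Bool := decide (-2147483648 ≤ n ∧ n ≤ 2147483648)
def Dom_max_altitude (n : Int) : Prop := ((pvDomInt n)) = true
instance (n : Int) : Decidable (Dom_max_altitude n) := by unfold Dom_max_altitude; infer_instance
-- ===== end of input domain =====

-- B replaces A's full re-walk of every Syracuse chain by dynamic programming over
-- the start values: peaks[i] is filled for i = 1..n, each chain is walked only
-- while it stays >= i and then the memoized peaks[x] of the first value x < i
-- supplies the rest (measurably faster).
-- Both Python loops are while-loops without a bound; the ports make them total with
-- the same fuel policy: whenever a chain does not reach 1 within pvFuel steps, the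
-- whole port returns the junk value 0.  B's port stores beside each peak the exact
-- chain length — pure fuel bookkeeping that makes B's port run out of fuel on
-- exactly the same inputs as A's port.

def pvFuel : Nat := 1000000

-- ===== PORT A =====
-- 'liste = [n]; while n != 1: ... liste.append(n)' of syracuse (none on fuel exhaustion)
def syracuseLoop : Nat → Int → List Int → Option (List Int)
  | 0, n, liste => if n = 1 then some liste else none
  | f+1, n, liste =>
    if n = 1 then some liste
    else if PySem.Int.mod n 2 = 0 then
      syracuseLoop f (PySem.Int.floordiv n 2) (liste ++ [PySem.Int.floordiv n 2])
    else
      syracuseLoop f (n * 3 + 1) (liste ++ [n * 3 + 1])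

def syracuse (n : Int) : Option (List Int) := syracuseLoop pvFuel n [n]

-- the body of A's 'for i in range(1, n + 1)' loop
def stepA (acc : Option (List Int)) (i : Int) : Option (List Int) :=
  match acc with
  | none => none
  | some liste =>
    match syracuse i with
    | none => none
    | some liste_syracuse =>
      -- max(liste_syracuse): the list starts as [i] and only grows, never empty
      some (liste ++ [(PySem.List.max? liste_syracuse (fun x => x)).getD 0])

def max_altitude (n : Int) : Int :=
  match (PySem.List.pyRange 1 (n + 1) 1).foldl stepA (some []) with
  | none => 0  -- unreachable fuel-exhaustion junk
  | some liste => (PySem.List.max? liste (fun x => x)).getD 0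
  -- max(liste) raises ValueError iff liste = [] iff n < 1, excluded by Pre_

-- ===== PORT B =====
-- 'x = x // 2 if x % 2 == 0 else x * 3 + 1'
def stepSyr (x : Int) : Int :=
  if PySem.Int.mod x 2 = 0 then PySem.Int.floordiv x 2 else x * 3 + 1

-- 'while x >= i: x = stepSyr x; if x > p: p = x' (none on fuel exhaustion);
-- the returned Nat counts the steps taken (fuel bookkeeping only)
def dropLoop : Nat → Int → Int → Int → Option (Int × Int × Nat)
  | 0, i, x, p => if x ≥ i then none else some (x, p, 0)
  | f+1, i, x, p =>
    if x ≥ i then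
      match dropLoop f i (stepSyr x) (if stepSyr x > p then stepSyr x else p) with
      | none => none
      | some (a, b, k) => some (a, b, k + 1)
    else some (x, p, 0)

-- the body of B's 'for i in range(2, n + 1)' loop; peaks entries carry beside the
-- Python value the exact chain length, used only for the shared fuel policy
def stepB (st : Option (List (Int × Nat))) (i : Int) : Option (List (Int × Nat)) :=
  match st with
  | none => none
  | some peaks =>
    match dropLoop pvFuel i i i with
    | none => none
    | some (x, p, k) =>
      match PySem.List.pyGet? peaks x with
      | none => none  -- unreachable: the chain drops to some 1 ≤ x < i < len(peaks)
      | some (v, len) =>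
        -- 'peaks.append(max(p, peaks[x]))'; the length check is the fuel policy:
        -- it fails exactly when A's full chain walk would run out of fuel
        if k + len ≤ pvFuel then some (peaks ++ [(max p v, k + len)]) else none

def max_altitude_alt (n : Int) : Int :=
  match (PySem.List.pyRange 2 (n + 1) 1).foldl stepB
      (some [((0 : Int), (0 : Nat)), ((1 : Int), (0 : Nat))]) with
  | none => 0  -- unreachable fuel-exhaustion junk
  | some peaks =>
    -- 'return max(peaks[1:n + 1])' (raises ValueError iff n < 1, excluded by Pre_)
    (PySem.List.max? ((PySem.List.slice peaks (some 1) (some (n + 1))).map Prod.fst)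
      (fun x => x)).getD 0

-- ===== PRECONDITION & SPEC =====
-- For n < 1 both Pythons raise ValueError (max of an empty list)
def Pre_max_altitude (n : Int) : Prop := 1 ≤ n
instance (n : Int) : Decidable (Pre_max_altitude n) := by unfold Pre_max_altitude; infer_instance
def pvWitness_max_altitude : Int := 7

def Spec_max_altitude (n : Int) (out : Int) : Prop := out = max_altitude_alt n
instance (n : Int) (out : Int) : Decidable (Spec_max_altitude n out) := by unfold Spec_max_altitude; infer_instance

-- ===== CLAIM =====
def Claim_equal_max_altitude : Prop := ∀ (n : Int), Dom_max_altitude n → Pre_max_altitude n → Spec_max_altitude n (max_altitude n)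

-- ===== LEMMAS AND PROOFS =====

-- the chain from x reaches 1 within f steps
def doneB : Nat → Int → Bool
  | 0, x => x == 1
  | f+1, x => x == 1 || doneB f (stepSyr x)

-- running max of p with the next (up to) f chain values after x (stopping at 1)
def chainPeak : Nat → Int → Int → Int
  | 0, _, p => p
  | f+1, x, p => if x = 1 then p else chainPeak f (stepSyr x) (max p (stepSyr x))

lemma if_gt_eq_max (a b : Int) : (if b > a then b else a) = max a b := by
  rw [max_def]; split_ifs <;> omega

lemma chainPeak_one : ∀ f p, chainPeak f 1 p = p
  | 0, _ => rfl
  | f+1, p => by simp [chainPeak]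

lemma doneB_one : ∀ f, doneB f 1 = true
  | 0 => rfl
  | f+1 => by simp [doneB]

lemma doneB_mono : ∀ f g x, doneB f x = true → f ≤ g → doneB g x = true := by
  intro f
  induction f with
  | zero =>
    intro g x h _
    have hx : x = 1 := by simpa [doneB] using h
    cases g with
    | zero => simpa [doneB] using h
    | succ g => simp [doneB, hx]
  | succ f ih =>
    intro g x h hle
    cases g with
    | zero => omega
    | succ g =>
      rcases (by simpa [doneB] using h : x = 1 ∨ doneB f (stepSyr x) = true) with hx | hd
      · simp [doneB, hx]
      · simp [doneB, ih g (stepSyr x) hd (by omega)]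

lemma chainPeak_stable : ∀ f g x p, doneB f x = true → f ≤ g →
    chainPeak g x p = chainPeak f x p := by
  intro f
  induction f with
  | zero =>
    intro g x p h _
    have hx : x = 1 := by simpa [doneB] using h
    simp [hx, chainPeak_one, chainPeak]
  | succ f ih =>
    intro g x p h hle
    cases g with
    | zero => omega
    | succ g =>
      by_cases hx : x = 1
      · simp [chainPeak, hx]
      · have hd : doneB f (stepSyr x) = true := by
          simpa [doneB, hx] using h
        simp [chainPeak, hx, ih g (stepSyr x) (max p (stepSyr x)) hd (by omega)]

lemma chainPeak_max_swap : ∀ f x a b, chainPeak f x (max a b) = max a (chainPeak f x b) := by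
  intro f
  induction f with
  | zero => intro x a b; simp [chainPeak]
  | succ f ih =>
    intro x a b
    by_cases hx : x = 1
    · simp [chainPeak, hx]
    · simp only [chainPeak, hx, if_false]
      rw [max_assoc, ih]

lemma stepSyr_pos (x : Int) (hx : 1 ≤ x) : 1 ≤ stepSyr x := by
  unfold stepSyr
  by_cases hm : PySem.Int.mod x 2 = 0
  · rw [if_pos hm]
    have hdvd : (2 : Int) ∣ x := (PySem.Int.mod_eq_zero_iff_dvd x 2).1 hm
    rw [PySem.Int.floordiv_eq_ediv_of_pos (by omega)]
    omega
  · rw [if_neg hm]; omega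

lemma max?_id_snoc (l : List Int) (a m : Int)
    (h : PySem.List.max? l (fun x => x) = some m) :
    PySem.List.max? (l ++ [a]) (fun x => x) = some (max m a) := by
  cases l with
  | nil => simp [PySem.List.max?] at h
  | cons x t =>
    rw [PySem.List.max?_id_cons] at h
    rw [List.cons_append, PySem.List.max?_id_cons]
    simp only [List.foldl_append, List.foldl_cons, List.foldl_nil]
    simp_all

-- unfolding A's loop one step off 1, in terms of stepSyr
lemma syrLoop_succ_ne (f : Nat) (x : Int) (l : List Int) (hx : x ≠ 1) :
    syracuseLoop (f+1) x l = syracuseLoop f (stepSyr x) (l ++ [stepSyr x]) := by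
  show (if x = 1 then some l
        else if PySem.Int.mod x 2 = 0 then
          syracuseLoop f (PySem.Int.floordiv x 2) (l ++ [PySem.Int.floordiv x 2])
        else syracuseLoop f (x * 3 + 1) (l ++ [x * 3 + 1])) = _
  rw [if_neg hx]
  by_cases hmod : PySem.Int.mod x 2 = 0
  · rw [if_pos hmod]; unfold stepSyr; rw [if_pos hmod]
  · rw [if_neg hmod]; unfold stepSyr; rw [if_neg hmod]

-- A's syracuse loop: returns none exactly when the chain does not finish within the
-- fuel, and otherwise a list whose max is the chain peak
lemma syrLoop_spec : ∀ f x l p, PySem.List.max? l (fun y => y) = some p →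
    (doneB f x = false → syracuseLoop f x l = none) ∧
    (doneB f x = true → ∃ l', syracuseLoop f x l = some l' ∧
      PySem.List.max? l' (fun y => y) = some (chainPeak f x p)) := by
  intro f
  induction f with
  | zero =>
    intro x l p hm
    constructor
    · intro h
      have hx : ¬ x = 1 := by simpa [doneB] using h
      simp [syracuseLoop, hx]
    · intro h
      have hx : x = 1 := by simpa [doneB] using h
      exact ⟨l, by simp [syracuseLoop, hx], by simpa [chainPeak] using hm⟩
  | succ f ih =>
    intro x l p hm
    by_cases hx : x = 1
    · constructor
      · intro h; simp [doneB, hx] at h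
      · intro _
        refine ⟨l, ?_, by simpa [chainPeak, hx] using hm⟩
        show (if x = 1 then some l else _) = some l
        rw [if_pos hx]
    · have hm' := max?_id_snoc l (stepSyr x) p hm
      have IH := ih (stepSyr x) (l ++ [stepSyr x]) (max p (stepSyr x)) hm'
      rw [syrLoop_succ_ne f x l hx]
      constructor
      · intro h
        have hd : doneB f (stepSyr x) = false := by simpa [doneB, hx] using h
        exact IH.1 hd
      · intro h
        have hd : doneB f (stepSyr x) = true := by simpa [doneB, hx] using h
        obtain ⟨l', hl', hml'⟩ := IH.2 hd
        exact ⟨l', hl', by simpa [chainPeak, hx] using hml'⟩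

-- B's inner loop: none means the chain stayed ≥ i ≥ 2 for f steps, so it cannot
-- have reached 1 within f steps
lemma drop_none : ∀ f (i x p : Int), 2 ≤ i → dropLoop f i x p = none → doneB f x = false := by
  intro f
  induction f with
  | zero =>
    intro i x p hi hd
    by_cases hge : x ≥ i
    · have hx : ¬ x = 1 := by omega
      simpa [doneB] using hx
    · simp [dropLoop, hge] at hd
  | succ f ih =>
    intro i x p hi hd
    by_cases hge : x ≥ i
    · have hx : ¬ x = 1 := by omega
      cases hrec : dropLoop f i (stepSyr x) (if stepSyr x > p then stepSyr x else p) with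
      | some t => simp [dropLoop, hge, hrec] at hd
      | none => simp [doneB, hx, ih i (stepSyr x) _ hi hrec]
    · simp [dropLoop, hge] at hd

-- master lemma for B's inner loop: it stops at the first chain value x' < i, and the
-- accumulated running max p' combines with the memoized peak of x' into the exact
-- chain peak, with exact chain-length accounting
lemma drop_master : ∀ f (i x p x' p' : Int) (k : Nat), 2 ≤ i →
    dropLoop f i x p = some (x', p', k) → 1 ≤ x → x ≤ p →
    1 ≤ x' ∧ x' < i ∧
    ∀ (len : Nat) (v : Int), doneB len x' = true → (∀ m, doneB m x' = true → len ≤ m) →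
      chainPeak len x' x' = v →
      doneB (k + len) x = true ∧ (∀ m, doneB m x = true → k + len ≤ m) ∧
      chainPeak (k + len) x p = max p' v := by
  intro f
  induction f with
  | zero =>
    intro i x p x' p' k hi hd hx1 hxp
    by_cases hge : x ≥ i
    · simp [dropLoop, hge] at hd
    · have h : x' = x ∧ p' = p ∧ k = 0 := by
        simp [dropLoop, hge] at hd
        exact ⟨hd.1.symm, hd.2.1.symm, hd.2.2.symm⟩
      obtain ⟨h1, h2, h3⟩ := h
      rw [h1, h2, h3]
      refine ⟨hx1, by omega, ?_⟩
      intro len v hdn hmin hcp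
      refine ⟨by simpa using hdn, by intro m hm; simpa using hmin m hm, ?_⟩
      simp only [Nat.zero_add]
      calc chainPeak len x p = chainPeak len x (max p x) := by rw [max_eq_left hxp]
        _ = max p (chainPeak len x x) := chainPeak_max_swap len x p x
        _ = max p v := by rw [hcp]
  | succ f ih =>
    intro i x p x' p' k hi hd hx1 hxp
    by_cases hge : x ≥ i
    · have hx : x ≠ 1 := by omega
      cases hrec : dropLoop f i (stepSyr x) (if stepSyr x > p then stepSyr x else p) with
      | none => simp [dropLoop, hge, hrec] at hd
      | some t =>
        obtain ⟨a, b, k'⟩ := t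
        have h : x' = a ∧ p' = b ∧ k = k' + 1 := by
          simp [dropLoop, hge, hrec] at hd
          exact ⟨hd.1.symm, hd.2.1.symm, hd.2.2.symm⟩
        obtain ⟨rfl, rfl, rfl⟩ := h
        rw [if_gt_eq_max] at hrec
        have hIH := ih i (stepSyr x) (max p (stepSyr x)) x' p' k' hi hrec
          (stepSyr_pos x hx1) (le_max_right _ _)
        refine ⟨hIH.1, hIH.2.1, ?_⟩
        intro len v hdn hmin hcp
        obtain ⟨hdn', hmin', hcp'⟩ := hIH.2.2 len v hdn hmin hcp
        refine ⟨?_, ?_, ?_⟩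
        · rw [show k' + 1 + len = (k' + len) + 1 by omega]
          simp [doneB, hdn']
        · intro m hm
          cases m with
          | zero => simp [doneB, hx] at hm
          | succ m =>
            have : doneB m (stepSyr x) = true := by simpa [doneB, hx] using hm
            have := hmin' m this
            omega
        · rw [show k' + 1 + len = (k' + len) + 1 by omega]
          show (if x = 1 then p else chainPeak (k' + len) (stepSyr x) (max p (stepSyr x))) = _
          rw [if_neg hx]
          exact hcp'
    · have h : x' = x ∧ p' = p ∧ k = 0 := by
        simp [dropLoop, hge] at hd
        exact ⟨hd.1.symm, hd.2.1.symm, hd.2.2.symm⟩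
      obtain ⟨h1, h2, h3⟩ := h
      rw [h1, h2, h3]
      refine ⟨hx1, by omega, ?_⟩
      intro len v hdn hmin hcp
      refine ⟨by simpa using hdn, by intro m hm; simpa using hmin m hm, ?_⟩
      simp only [Nat.zero_add]
      calc chainPeak len x p = chainPeak len x (max p x) := by rw [max_eq_left hxp]
        _ = max p (chainPeak len x x) := chainPeak_max_swap len x p x
        _ = max p v := by rw [hcp]

-- B's table after filling indices 1..m: one entry per index, first components are
-- exactly A's list of per-start maxima, and every entry records the exact chain
-- length (≤ pvFuel) together with the true chain peak
def GoodT (m : Nat) (l : List Int) (peaks : List (Int × Nat)) : Prop :=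
  peaks.length = m + 1 ∧
  (peaks.drop 1).map Prod.fst = l ∧
  ∀ j : Nat, 1 ≤ j → j ≤ m →
    ∃ v len, peaks[j]? = some (v, len) ∧
      doneB len (j : Int) = true ∧ (∀ m', doneB m' (j : Int) = true → len ≤ m') ∧
      chainPeak len (j : Int) (j : Int) = v ∧ len ≤ pvFuel

def InvS (m : Nat) (sa : Option (List Int)) (sb : Option (List (Int × Nat))) : Prop :=
  (sa = none ∧ sb = none) ∨
  ∃ l peaks, sa = some l ∧ sb = some peaks ∧ GoodT m l peaks

lemma step_inv (m : Nat) (sa : Option (List Int)) (sb : Option (List (Int × Nat)))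
    (hm : 1 ≤ m) (h : InvS m sa sb) :
    InvS (m + 1) (stepA sa ((m : Int) + 1)) (stepB sb ((m : Int) + 1)) := by
  rcases h with ⟨ha, hb⟩ | ⟨l, peaks, ha, hb, hlen, hmap, hidx⟩
  · subst ha; subst hb; exact Or.inl ⟨rfl, rfl⟩
  · subst ha; subst hb
    set i : Int := (m : Int) + 1 with hi
    have hi2 : 2 ≤ i := by omega
    have hsp := syrLoop_spec pvFuel i [i] i (by rw [PySem.List.max?_id_cons]; rfl)
    cases hd : dropLoop pvFuel i i i with
    | none =>
      have hdf : doneB pvFuel i = false := drop_none pvFuel i i i hi2 hd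
      have hsn : syracuse i = none := hsp.1 hdf
      simp only [stepA, stepB, hsn, hd]
      exact Or.inl ⟨rfl, rfl⟩
    | some t =>
      obtain ⟨x, p, k⟩ := t
      obtain ⟨hx1, hxi, himp⟩ :=
        drop_master pvFuel i i i x p k hi2 hd (by omega) le_rfl
      -- the memoized entry at x
      have hjx : x = ((x.toNat : Nat) : Int) := by omega
      obtain ⟨v, len, hget, hdn, hmin, hcp, hlenF⟩ :=
        hidx x.toNat (by omega) (by omega)
      have hpg : PySem.List.pyGet? peaks x = some (v, len) := by
        rw [PySem.List.pyGet?_of_nonneg peaks (by omega : (0:Int) ≤ x)]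
        exact hget
      obtain ⟨hdone, hminI, hpeak⟩ := himp len v (by rwa [← hjx] at hdn)
        (by intro m' hm'; exact hmin m' (by rwa [← hjx])) (by rwa [← hjx] at hcp)
      by_cases hle : k + len ≤ pvFuel
      · -- both sides succeed and append the same peak
        have hdt : doneB pvFuel i = true := doneB_mono _ _ _ hdone hle
        obtain ⟨l', hl', hml'⟩ := hsp.2 hdt
        have hval : (PySem.List.max? l' (fun y => y)).getD 0 = max p v := by
          rw [hml', Option.getD_some, chainPeak_stable _ _ _ _ hdone hle, hpeak]
        simp only [stepA, stepB, show syracuse i = some l' from hl', hd, hpg, if_pos hle]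
        refine Or.inr ⟨l ++ [max p v], peaks ++ [(max p v, k + len)], by rw [hval], rfl,
          ?_, ?_, ?_⟩
        · simp [hlen]
        · rw [List.drop_append_of_le_length (by omega), List.map_append, hmap]
          rfl
        · intro j hj1 hjm
          by_cases hjold : j ≤ m
          · obtain ⟨v', len', hget', rest⟩ := hidx j hj1 hjold
            refine ⟨v', len', ?_, rest⟩
            rw [List.getElem?_append_left (by omega)]
            exact hget'
          · have hje : j = m + 1 := by omega
            subst hje
            refine ⟨max p v, k + len, ?_, ?_, ?_, ?_, hle⟩
            · rw [show m + 1 = peaks.length + 0 by omega, List.getElem?_append_right (by omega)]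
              simp
            · rw [show ((m + 1 : Nat) : Int) = i by omega]
              exact hdone
            · intro m' hm'
              exact hminI m' (by rwa [show ((m + 1 : Nat) : Int) = i by omega] at hm')
            · rw [show ((m + 1 : Nat) : Int) = i by omega]
              exact hpeak
      · -- the chain from i needs more than pvFuel steps: both sides poison
        have hdf : doneB pvFuel i = false := by
          cases hcase : doneB pvFuel i
          · rfl
          · exact absurd (hminI pvFuel hcase) hle
        have hsn : syracuse i = none := hsp.1 hdf
        simp only [stepA, stepB, hsn, hd, hpg, if_neg hle]
        exact Or.inl ⟨rfl, rfl⟩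

lemma main_inv : ∀ t : Nat,
    InvS (1 + t)
      ((PySem.List.pyRange 1 (((1 + t : Nat) : Int) + 1) 1).foldl stepA (some []))
      ((PySem.List.pyRange 2 (((1 + t : Nat) : Int) + 1) 1).foldl stepB
        (some [((0 : Int), (0 : Nat)), ((1 : Int), (0 : Nat))])) := by
  intro t
  induction t with
  | zero =>
    have hr1 : PySem.List.pyRange 1 (((1 + 0 : Nat) : Int) + 1) 1 = [1] := by decide
    have hr2 : PySem.List.pyRange 2 (((1 + 0 : Nat) : Int) + 1) 1 = [] := by decide
    rw [hr1, hr2]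
    have hsp := syrLoop_spec pvFuel 1 [1] 1 (by rw [PySem.List.max?_id_cons]; rfl)
    obtain ⟨l', hl', hml'⟩ := hsp.2 (doneB_one pvFuel)
    have hval : (PySem.List.max? l' (fun y => y)).getD 0 = 1 := by
      rw [hml', Option.getD_some, chainPeak_one]
    refine Or.inr ⟨[1], [((0 : Int), (0 : Nat)), ((1 : Int), (0 : Nat))], ?_, rfl, ?_, ?_, ?_⟩
    · simp only [List.foldl_cons, List.foldl_nil, stepA,
        show syracuse 1 = some l' from hl', hval]
      rfl
    · rfl
    · rfl
    · intro j hj1 hjm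
      have hje : j = 1 := by omega
      subst hje
      exact ⟨1, 0, rfl, by decide, fun m' _ => Nat.zero_le m', rfl, Nat.zero_le _⟩
  | succ t ih =>
    have hb : (((1 + (t + 1) : Nat) : Int) + 1) = (((1 + t : Nat) : Int) + 1) + 1 := by
      push_cast; ring
    have hsplit1 : PySem.List.pyRange 1 (((1 + (t + 1) : Nat) : Int) + 1) 1 =
        PySem.List.pyRange 1 (((1 + t : Nat) : Int) + 1) 1 ++ [((1 + t : Nat) : Int) + 1] := by
      rw [hb]
      exact PySem.List.pyRange_one_succ_right (by push_cast; omega)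
    have hsplit2 : PySem.List.pyRange 2 (((1 + (t + 1) : Nat) : Int) + 1) 1 =
        PySem.List.pyRange 2 (((1 + t : Nat) : Int) + 1) 1 ++ [((1 + t : Nat) : Int) + 1] := by
      rw [hb]
      exact PySem.List.pyRange_one_succ_right (by push_cast; omega)
    rw [hsplit1, hsplit2, List.foldl_append, List.foldl_append]
    simp only [List.foldl_cons, List.foldl_nil]
    have := step_inv (1 + t) _ _ (by omega) ih
    rw [show ((1 + t : Nat) : Int) = ((1 + t : Nat) : Int) from rfl] at this
    rw [show (1 + (t + 1)) = (1 + t) + 1 by omega]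
    exact this

-- ===== VERDICT =====
theorem max_altitude_spec : Claim_equal_max_altitude := by
  intro n _ hpre
  have hpre' : 1 ≤ n := hpre
  unfold Spec_max_altitude max_altitude max_altitude_alt
  obtain ⟨t, ht⟩ : ∃ t : Nat, n = ((1 + t : Nat) : Int) :=
    ⟨(n - 1).toNat, by omega⟩
  subst ht
  have h := main_inv t
  rcases h with ⟨ha, hb⟩ | ⟨l, peaks, ha, hb, hlen, hmap, _⟩
  · rw [ha, hb]
  · rw [ha, hb]
    show (PySem.List.max? l (fun x => x)).getD 0 =
      (PySem.List.max? ((PySem.List.slice peaks (some 1)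
        (some (((1 + t : Nat) : Int) + 1))).map Prod.fst) (fun x => x)).getD 0
    have hslice : PySem.List.slice peaks (some 1) (some (((1 + t : Nat) : Int) + 1)) =
        peaks.drop 1 := by
      rw [PySem.List.slice_toNat peaks (by omega) (by push_cast; omega)]
      have h1 : (1 : Int).toNat = 1 := rfl
      have h2 : (((1 + t : Nat) : Int) + 1).toNat = t + 2 := by omega
      rw [h1, h2]
      apply List.take_of_length_le
      simp [hlen]
      omega
    rw [hslice, hmap]
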